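-- pv_equiv track=rewrite | github.com/Dan-Mihaylov/Software-Uni-Courses | Python Advanced/Modules Lab/print_triangle.py | create_triangle
-- ===== SOURCE A (Python) =====
-- def create_triangle(number: int):
--     result = []
--
--     for i in range(1, number + 1):
--         current = ""
--
--         for j in range(1, i + 1):
--             current += str(j)
--         result.append(current + "\n")
--
--     for i in range(number - 1, 0, -1):
--         current = ""
--
--         for j in range(i, 0, -1):
--             current += str(j)
--         result.append(current + "\n")
--
--     return "".join(result)
-- ===== SOURCE B (Python) =====
-- def create_triangle(number: int):
--     # Grow each row from the previous one instead of rebuilding it with an inner loop.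
--     up = ""
--     asc = []
--     for i in range(1, number + 1):
--         up += str(i)
--         asc.append(up + "\n")
--     down = ""
--     desc = []
--     for i in range(1, number):
--         down = str(i) + down
--         desc.append(down + "\n")
--     desc.reverse()
--     return "".join(asc) + "".join(desc)
-- ===== Notes on version B (the rewrite author's own statement) =====
-- stated objective: alternative
-- what changed: Each row is grown incrementally from the previous row via running accumulator strings (append for the ascending block, prepend for the descending block, whose rows are collected ascending and emitted reversed), eliminating A's nested inner loops that rebuild every row from scratch.
import Mathlib
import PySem

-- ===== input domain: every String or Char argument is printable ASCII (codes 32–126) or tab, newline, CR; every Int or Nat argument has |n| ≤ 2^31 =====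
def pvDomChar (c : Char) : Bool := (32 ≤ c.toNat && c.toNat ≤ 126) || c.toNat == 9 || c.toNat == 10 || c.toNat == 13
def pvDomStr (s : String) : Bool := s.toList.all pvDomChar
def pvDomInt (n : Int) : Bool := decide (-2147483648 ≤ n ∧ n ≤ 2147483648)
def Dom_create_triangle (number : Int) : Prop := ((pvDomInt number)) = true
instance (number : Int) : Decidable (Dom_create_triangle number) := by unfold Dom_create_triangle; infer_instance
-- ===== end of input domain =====

-- B grows each row incrementally from the previous row (running accumulator strings, one pass per
-- block, no inner loop) instead of rebuilding every row with a nested loop; objective: alternative.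

-- ===== PORT A =====
def create_triangle (number : Int) : String :=
  let result : List String :=
    (PySem.List.pyRange 1 (number + 1) 1).foldl (fun acc i =>
      acc ++ [((PySem.List.pyRange 1 (i + 1) 1).foldl
                 (fun current j => current ++ PySem.Int.toStr j) "") ++ "\n"]) []
  let result :=
    (PySem.List.pyRange (number - 1) 0 (-1)).foldl (fun acc i =>
      acc ++ [((PySem.List.pyRange i 0 (-1)).foldl
                 (fun current j => current ++ PySem.Int.toStr j) "") ++ "\n"]) result
  PySem.Str.join "" result

-- ===== PORT B =====
def create_triangle_alt (number : Int) : String :=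
  let s1 :=
    (PySem.List.pyRange 1 (number + 1) 1).foldl (fun (s : String × List String) i =>
      let up := s.1 ++ PySem.Int.toStr i
      (up, s.2 ++ [up ++ "\n"])) ("", [])
  let s2 :=
    (PySem.List.pyRange 1 number 1).foldl (fun (s : String × List String) i =>
      let down := PySem.Int.toStr i ++ s.1
      (down, s.2 ++ [down ++ "\n"])) ("", [])
  PySem.Str.join "" s1.2 ++ PySem.Str.join "" s2.2.reverse

-- ===== PRECONDITION & SPEC =====
def Spec_create_triangle (number : Int) (out : String) : Prop := out = create_triangle_alt number
instance (number : Int) (out : String) : Decidable (Spec_create_triangle number out) := by unfold Spec_create_triangle; infer_instance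

-- ===== CLAIM (what is proved, stated in full; the proofs are below) =====
def Claim_equal_create_triangle : Prop := ∀ (number : Int), Dom_create_triangle number → Spec_create_triangle number (create_triangle number)

-- ===== LEMMAS AND PROOFS =====

-- reference rows: ascRow k = "12…k", descRow k = "k…21"
def ascRow : Nat → String
  | 0 => ""
  | k+1 => ascRow k ++ PySem.Int.toStr ((k : Int) + 1)

def descRow : Nat → String
  | 0 => ""
  | k+1 => PySem.Int.toStr ((k : Int) + 1) ++ descRow k

theorem flat_inter (l : List (List Char)) : (List.intersperse ([]:List Char) l).flatten = l.flatten := by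
  induction l with
  | nil => rfl
  | cons x xs ih =>
    cases xs with
    | nil => rfl
    | cons y ys => simp_all [List.intersperse]

theorem join_append (xs ys : List String) :
    PySem.Str.join "" (xs ++ ys) = PySem.Str.join "" xs ++ PySem.Str.join "" ys := by
  simp [PySem.Str.join, PySem.Chars.join, List.intercalate, flat_inter, String.ofList_append]

theorem join_nil : PySem.Str.join "" ([] : List String) = "" := rfl

-- inner ascending fold of A builds ascRow
theorem innerA_asc (i : Nat) (c : String) :
    (PySem.List.pyRange 1 ((i : Int) + 1) 1).foldl (fun current j => current ++ PySem.Int.toStr j) c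
      = c ++ ascRow i := by
  induction i generalizing c with
  | zero => simp [PySem.List.pyRange_one_eq_nil, ascRow]
  | succ k ih =>
    rw [show ((k + 1 : Nat) : Int) + 1 = ((k : Int) + 1) + 1 by push_cast; ring,
        PySem.List.pyRange_one_succ_right (by omega), List.foldl_append, ih]
    simp [ascRow, String.append_assoc]

-- inner descending fold of A builds descRow
theorem innerA_desc (i : Nat) (c : String) :
    (PySem.List.pyRange (i : Int) 0 (-1)).foldl (fun current j => current ++ PySem.Int.toStr j) c
      = c ++ descRow i := by
  induction i generalizing c with
  | zero => simp [PySem.List.pyRange_neg_one_eq_nil, descRow]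
  | succ k ih =>
    rw [PySem.List.pyRange_neg_one_cons (by omega)]
    simp only [List.foldl_cons]
    rw [show ((k + 1 : Nat) : Int) - 1 = (k : Int) by push_cast; ring, ih]
    simp [descRow, String.append_assoc]

-- B's ascending fold: running row = ascRow, rows collected in order
theorem B_asc (n : Nat) :
    (PySem.List.pyRange 1 ((n : Int) + 1) 1).foldl (fun (s : String × List String) i =>
      let up := s.1 ++ PySem.Int.toStr i
      (up, s.2 ++ [up ++ "\n"])) ("", [])
    = (ascRow n, (List.range n).map (fun k => ascRow (k+1) ++ "\n")) := by
  induction n with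
  | zero => simp [PySem.List.pyRange_one_eq_nil, ascRow]
  | succ k ih =>
    rw [show ((k + 1 : Nat) : Int) + 1 = ((k : Int) + 1) + 1 by push_cast; ring,
        PySem.List.pyRange_one_succ_right (by omega), List.foldl_append, ih]
    simp [List.range_succ, ascRow]

-- B's descending fold: running row = descRow (prepended), rows collected ascending
theorem B_desc (m : Nat) :
    (PySem.List.pyRange 1 ((m : Int) + 1) 1).foldl (fun (s : String × List String) i =>
      let down := PySem.Int.toStr i ++ s.1
      (down, s.2 ++ [down ++ "\n"])) ("", [])
    = (descRow m, (List.range m).map (fun k => descRow (k+1) ++ "\n")) := by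
  induction m with
  | zero => simp [PySem.List.pyRange_one_eq_nil, descRow]
  | succ k ih =>
    rw [show ((k + 1 : Nat) : Int) + 1 = ((k : Int) + 1) + 1 by push_cast; ring,
        PySem.List.pyRange_one_succ_right (by omega), List.foldl_append, ih]
    simp [List.range_succ, descRow]

-- A's first loop produces the ascending rows in order
theorem A_asc (n : Nat) :
    (PySem.List.pyRange 1 ((n : Int) + 1) 1).foldl (fun acc i =>
      acc ++ [((PySem.List.pyRange 1 (i + 1) 1).foldl
                 (fun current j => current ++ PySem.Int.toStr j) "") ++ "\n"]) []
    = (List.range n).map (fun k => ascRow (k+1) ++ "\n") := by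
  induction n with
  | zero => simp [PySem.List.pyRange_one_eq_nil]
  | succ k ih =>
    rw [show ((k + 1 : Nat) : Int) + 1 = ((k : Int) + 1) + 1 by push_cast; ring,
        PySem.List.pyRange_one_succ_right (by omega), List.foldl_append, ih]
    have : ((k : Int) + 1) = ((k + 1 : Nat) : Int) := by push_cast; ring
    rw [List.foldl_cons]
    simp only [List.foldl_nil, this, innerA_asc]
    simp [List.range_succ]

-- A's second loop appends the descending rows = B's ascending-built rows, reversed
theorem A_desc (m : Nat) (acc0 : List String) :
    (PySem.List.pyRange (m : Int) 0 (-1)).foldl (fun acc i =>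
      acc ++ [((PySem.List.pyRange i 0 (-1)).foldl
                 (fun current j => current ++ PySem.Int.toStr j) "") ++ "\n"]) acc0
    = acc0 ++ ((List.range m).map (fun k => descRow (k+1) ++ "\n")).reverse := by
  induction m generalizing acc0 with
  | zero => simp [PySem.List.pyRange_neg_one_eq_nil]
  | succ k ih =>
    rw [PySem.List.pyRange_neg_one_cons (by omega)]
    simp only [List.foldl_cons]
    rw [show ((k + 1 : Nat) : Int) - 1 = (k : Int) by push_cast; ring, ih,
        innerA_desc (k+1) ""]
    simp [List.range_succ]

theorem main_eq (number : Int) : create_triangle number = create_triangle_alt number := by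
  by_cases h : number ≤ 0
  · simp [create_triangle, create_triangle_alt,
      PySem.List.pyRange_one_eq_nil (show number + 1 ≤ 1 by omega),
      PySem.List.pyRange_neg_one_eq_nil (show number - 1 ≤ 0 by omega),
      PySem.List.pyRange_one_eq_nil (show number ≤ 1 by omega), join_nil]
  · obtain ⟨n, rfl⟩ : ∃ n : Nat, number = (n : Int) + 1 := ⟨(number - 1).toNat, by omega⟩
    simp only [create_triangle, create_triangle_alt]
    rw [show ((n : Int) + 1 + 1) = ((n + 1 : Nat) : Int) + 1 by push_cast; ring,
        show ((n : Int) + 1 - 1) = (n : Int) by ring,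
        A_asc (n+1), A_desc n, B_asc (n+1), B_desc n, join_append]

-- ===== VERDICT (by name: the statement is the Claim_ definition above) =====
theorem create_triangle_spec : Claim_equal_create_triangle := by
  intro number _
  unfold Spec_create_triangle
  exact main_eq number
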